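-- pv_equiv track=rewrite | github.com/parksomii/Algorithm | 프로그래머스/0/181837. 커피 심부름/커피 심부름.py | solution
-- ===== SOURCE A (Python) =====
-- def solution(order):
--     total = 0
--     for menu in order:
--         if "cafelatte" in menu:
--             total += 5000
--         else:
--             total += 4500
--     return total
-- ===== SOURCE B (Python) =====
-- def solution(order):
--     # Divide and conquer: split the order list in half and recurse;
--     # a singleton costs 4500 plus a 500 cafelatte surcharge.
--     n = len(order)
--     if n == 0:
--         return 0
--     if n == 1:
--         return 4500 + 500 * ("cafelatte" in order[0])
--     mid = n // 2
--     return solution(order[:mid]) + solution(order[mid:])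
-- ===== Notes on version B (the rewrite author's own statement) =====
-- stated objective: alternative
-- what changed: Replaces A's single left-to-right if/else accumulator loop with a divide-and-conquer recursion: split the list in half, recurse on both halves, and price a singleton directly (4500 plus 500 cafelatte surcharge); correct because addition of per-item prices is associative.
import Mathlib
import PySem

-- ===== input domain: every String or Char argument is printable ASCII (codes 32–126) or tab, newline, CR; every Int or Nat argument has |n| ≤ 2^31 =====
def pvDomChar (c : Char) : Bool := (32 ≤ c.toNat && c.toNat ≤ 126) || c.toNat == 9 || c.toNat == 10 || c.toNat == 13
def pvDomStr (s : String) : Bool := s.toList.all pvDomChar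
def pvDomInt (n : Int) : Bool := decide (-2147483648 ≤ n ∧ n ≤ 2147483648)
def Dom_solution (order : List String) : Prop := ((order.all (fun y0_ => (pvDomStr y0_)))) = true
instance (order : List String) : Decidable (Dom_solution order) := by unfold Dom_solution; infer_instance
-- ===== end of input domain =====

-- B replaces A's single if/else accumulator loop with a divide-and-conquer recursion on list halves; same result, alternative decomposition.


-- ===== PORT A =====
def solution (order : List String) : Int :=
  order.foldl (fun total menu =>
    if PySem.Str.isIn "cafelatte" menu then total + 5000 else total + 4500) 0

-- ===== PORT B =====
-- order[:mid] / order[mid:] with 0 ≤ mid ≤ len are exactly take/drop (PySem.List.slice_to / slice_from).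
def solution_alt : List String → Int
  | [] => 0
  | [m] => 4500 + 500 * (if PySem.Str.isIn "cafelatte" m then (1 : Int) else 0)
  | m1 :: m2 :: rest =>
    let mid := (m1 :: m2 :: rest).length / 2
    solution_alt ((m1 :: m2 :: rest).take mid) + solution_alt ((m1 :: m2 :: rest).drop mid)
termination_by order => order.length
decreasing_by
  · simp only [List.length_take, List.length_cons]; omega
  · simp only [List.length_drop, List.length_cons]; omega

-- ===== PRECONDITION & SPEC =====
def Spec_solution (order : List String) (out : Int) : Prop := out = solution_alt order
instance (order : List String) (out : Int) : Decidable (Spec_solution order out) := by unfold Spec_solution; infer_instance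

-- ===== CLAIM (what is proved, stated in full; the proofs are below) =====
def Claim_equal_solution : Prop := ∀ (order : List String), Dom_solution order → Spec_solution order (solution order)

-- ===== LEMMAS AND PROOFS =====
def pvPrice (m : String) : Int := if PySem.Str.isIn "cafelatte" m then 5000 else 4500

theorem solution_eq_sum (order : List String) :
    solution order = (order.map pvPrice).sum := by
  suffices h : ∀ (acc : Int) (xs : List String),
      xs.foldl (fun total menu =>
        if PySem.Str.isIn "cafelatte" menu then total + 5000 else total + 4500) acc
      = acc + (xs.map pvPrice).sum by
    simpa [solution] using h 0 order
  intro acc xs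
  induction xs generalizing acc with
  | nil => simp
  | cons y ys ih =>
    simp only [List.foldl_cons, List.map_cons, List.sum_cons, ih, pvPrice]
    split_ifs <;> ring

theorem solution_alt_eq_sum (order : List String) :
    solution_alt order = (order.map pvPrice).sum := by
  induction order using solution_alt.induct with
  | case1 => simp [solution_alt]
  | case2 m =>
    simp only [solution_alt, List.map_cons, List.map_nil, List.sum_cons, List.sum_nil, pvPrice]
    split_ifs <;> ring
  | case3 m1 m2 rest mid ih1 ih2 =>
    rw [solution_alt, ih1, ih2, List.map_take, List.map_drop,
      List.sum_take_add_sum_drop]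

-- ===== VERDICT (by name: the statement is the Claim_ definition above) =====
theorem solution_spec : Claim_equal_solution := by
  intro order _
  unfold Spec_solution
  rw [solution_eq_sum, solution_alt_eq_sum]
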